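-- pv_equiv track=rewrite | github.com/BARarch/My-Hackerranks | classifyStings191001.py | classifyStringsHelper
-- ===== SOURCE A (Python) =====
-- def classifyStringsHelper(s, consVowels, consCons):
--     vowels = 'aeiou'
--     for i, c in enumerate(s):
--         if c == "?":
--             vowelBranch = classifyStringsHelper('a' + s[i + 1:], consVowels, consCons)
--             if vowelBranch == 'mixed':
--                 return 'mixed'
--             consBranch = classifyStringsHelper('b' + s[i + 1:], consVowels, consCons)
--             if consBranch == 'mixed':
--                 return 'mixed'
--             if consBranch != vowelBranch:
--                 return 'mixed'
--             return consBranch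
--         elif c in vowels:
--             consCons = ''
--             consVowels += c
--             if len(consVowels) == 3:
--                 return 'bad'
--         else:
--             consVowels = ''
--             consCons += c
--             if len(consCons) == 5:
--                 return 'bad'
--
--     return 'good'
-- ===== SOURCE B (Python) =====
-- def classifyStringsHelper(s, consVowels, consCons):
--     vowels = 'aeiou'
--     states = {(len(consVowels), len(consCons))}
--     anyBad = False
--     for ch in s:
--         asVowel = ch == '?' or ch in vowels
--         asCons = ch == '?' or ch not in vowels
--         nxt = set()
--         for v, c in states:
--             if asVowel:
--                 if v + 1 == 3:
--                     anyBad = True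
--                 else:
--                     nxt.add((v + 1, 0))
--             if asCons:
--                 if c + 1 == 5:
--                     anyBad = True
--                 else:
--                     nxt.add((0, c + 1))
--         states = nxt
--     if states and anyBad:
--         return 'mixed'
--     if anyBad:
--         return 'bad'
--     return 'good'
-- ===== Notes on version B (the rewrite author's own statement) =====
-- stated objective: alternative
-- what changed: Replaced A's branch-and-recurse over every '?' (re-scanning the suffix once per vowel/consonant substitution) by a single left-to-right pass maintaining the set of reachable (vowel-run, consonant-run) states plus a bad-reachability flag; good/bad/mixed is read off the final state set and flag.
import Mathlib
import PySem

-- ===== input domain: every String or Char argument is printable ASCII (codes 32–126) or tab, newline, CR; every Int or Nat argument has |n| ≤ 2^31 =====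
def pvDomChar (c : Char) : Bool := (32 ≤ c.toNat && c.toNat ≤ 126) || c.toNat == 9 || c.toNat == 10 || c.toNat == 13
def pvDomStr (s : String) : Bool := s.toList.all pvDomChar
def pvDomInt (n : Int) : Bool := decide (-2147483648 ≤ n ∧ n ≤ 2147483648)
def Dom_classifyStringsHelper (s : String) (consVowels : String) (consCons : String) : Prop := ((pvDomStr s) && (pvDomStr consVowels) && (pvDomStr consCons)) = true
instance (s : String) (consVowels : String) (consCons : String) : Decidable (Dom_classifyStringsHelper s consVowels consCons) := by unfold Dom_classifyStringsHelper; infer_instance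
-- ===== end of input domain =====

-- B replaces A's recursive branching over '?' characters by one left-to-right pass
-- maintaining the set of reachable (vowel-run, consonant-run) states (alternative algorithm).


-- ===== PORT A =====
-- 'c in "aeiou"' on a single character (used by both ports)
def pvIsVowel (c : Char) : Bool := (String.toList "aeiou").contains c

-- A's loop-with-recursion on the character lists of s, consVowels, consCons
def pvGoA : List Char → List Char → List Char → String
  | [], _, _ => "good"
  | c :: rest, cv, cc =>
    if c = '?' then
      let vb := pvGoA ('a' :: rest) cv cc
      if vb = "mixed" then "mixed"
      else
        let cb := pvGoA ('b' :: rest) cv cc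
        if cb = "mixed" then "mixed"
        else if cb ≠ vb then "mixed" else cb
    else if pvIsVowel c then
      let cv' := cv ++ [c]
      if cv'.length = 3 then "bad" else pvGoA rest cv' []
    else
      let cc' := cc ++ [c]
      if cc'.length = 5 then "bad" else pvGoA rest [] cc'
termination_by s _ _ => 2 * s.length + (if s.head? = some '?' then 1 else 0)
decreasing_by
  all_goals simp_all
  all_goals split_ifs <;> omega

def classifyStringsHelper (s : String) (consVowels : String) (consCons : String) : String :=
  pvGoA s.toList consVowels.toList consCons.toList

-- ===== PORT B =====
-- inner loop body of Source B: advance one reachable state (v, c) on a character readable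
-- as a vowel (asV) and/or as a consonant (asC); acc = (next state set, anyBad flag)
def pvAltInner (asV asC : Bool) (acc : PySem.Set (Int × Int) × Bool) (vc : Int × Int) :
    PySem.Set (Int × Int) × Bool :=
  let acc1 :=
    if asV then
      if vc.1 + 1 = 3 then (acc.1, true) else (PySem.Set.add acc.1 (vc.1 + 1, 0), acc.2)
    else acc
  if asC then
    if vc.2 + 1 = 5 then (acc1.1, true) else (PySem.Set.add acc1.1 (0, vc.2 + 1), acc1.2)
  else acc1

-- one character of Source B's outer loop
def pvAltChar (acc : PySem.Set (Int × Int) × Bool) (ch : Char) : PySem.Set (Int × Int) × Bool :=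
  let asV := ch = '?' || pvIsVowel ch
  let asC := ch = '?' || !pvIsVowel ch
  acc.1.foldl (pvAltInner asV asC) (PySem.Set.empty, acc.2)

def classifyStringsHelper_alt (s : String) (consVowels : String) (consCons : String) : String :=
  let init : PySem.Set (Int × Int) :=
    PySem.Set.ofList [((consVowels.toList.length : Int), (consCons.toList.length : Int))]
  let r := s.toList.foldl pvAltChar (init, false)
  if !r.1.isEmpty && r.2 then "mixed"
  else if r.2 then "bad"
  else "good"

-- ===== PRECONDITION & SPEC =====
def Spec_classifyStringsHelper (s : String) (consVowels : String) (consCons : String) (out : String) : Prop := out = classifyStringsHelper_alt s consVowels consCons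
instance (s : String) (consVowels : String) (consCons : String) (out : String) : Decidable (Spec_classifyStringsHelper s consVowels consCons out) := by unfold Spec_classifyStringsHelper; infer_instance

-- ===== CLAIM (what is proved, stated in full; the proofs are below) =====
def Claim_equal_classifyStringsHelper : Prop := ∀ (s : String) (consVowels : String) (consCons : String), Dom_classifyStringsHelper s consVowels consCons → Spec_classifyStringsHelper s consVowels consCons (classifyStringsHelper s consVowels consCons)

-- ===== LEMMAS AND PROOFS =====

-- "some completion of s (from runs v, c) is classified good" (resp. "bad")
def pvAnyGood : List Char → Int → Int → Bool
  | [], _, _ => true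
  | ch :: r, v, c =>
    ((ch = '?' || pvIsVowel ch) && (if v + 1 = 3 then false else pvAnyGood r (v + 1) 0))
    || ((ch = '?' || !pvIsVowel ch) && (if c + 1 = 5 then false else pvAnyGood r 0 (c + 1)))

def pvAnyBad : List Char → Int → Int → Bool
  | [], _, _ => false
  | ch :: r, v, c =>
    ((ch = '?' || pvIsVowel ch) && (if v + 1 = 3 then true else pvAnyBad r (v + 1) 0))
    || ((ch = '?' || !pvIsVowel ch) && (if c + 1 = 5 then true else pvAnyBad r 0 (c + 1)))

def pvJudge (g b : Bool) : String := if g && b then "mixed" else if b then "bad" else "good"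

theorem pvTotal (s : List Char) (v c : Int) : (pvAnyGood s v c || pvAnyBad s v c) = true := by
  induction s generalizing v c with
  | nil => simp [pvAnyGood, pvAnyBad]
  | cons ch r ih =>
    simp only [pvAnyGood, pvAnyBad]
    have h1 := ih (v + 1) 0
    have h2 := ih 0 (c + 1)
    by_cases hc : ch = '?' <;> by_cases hv : pvIsVowel ch = true <;>
      simp [hc, hv] <;> by_cases h3 : v + 1 = 3 <;> by_cases h5 : c + 1 = 5 <;> simp_all <;>
      first
        | tauto
        | (rcases ih (v + 1) 0 with h | h <;> tauto)

theorem pvCombine : ∀ (gV bV gC bC : Bool), (gV || bV) = true → (gC || bC) = true →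
    (if pvJudge gV bV = "mixed" then "mixed"
     else if pvJudge gC bC = "mixed" then "mixed"
     else if pvJudge gC bC ≠ pvJudge gV bV then "mixed" else pvJudge gC bC)
      = pvJudge (gV || gC) (bV || bC) := by decide

theorem pvGoodQ (rest : List Char) (v c : Int) :
    pvAnyGood ('?' :: rest) v c = (pvAnyGood ('a' :: rest) v c || pvAnyGood ('b' :: rest) v c) := by
  simp [pvAnyGood, pvIsVowel]

theorem pvBadQ (rest : List Char) (v c : Int) :
    pvAnyBad ('?' :: rest) v c = (pvAnyBad ('a' :: rest) v c || pvAnyBad ('b' :: rest) v c) := by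
  simp [pvAnyBad, pvIsVowel]

theorem pvGoA_eq_aux : ∀ (n : Nat) (s cv cc : List Char),
    2 * s.length + (if s.head? = some '?' then 1 else 0) ≤ n →
    pvGoA s cv cc = pvJudge (pvAnyGood s cv.length cc.length) (pvAnyBad s cv.length cc.length) := by
  intro n
  induction n with
  | zero => intro s cv cc h; cases s with
    | nil => simp [pvGoA, pvAnyGood, pvAnyBad, pvJudge]
    | cons ch rest => simp at h
  | succ n ih =>
    intro s cv cc hm
    cases s with
    | nil => simp [pvGoA, pvAnyGood, pvAnyBad, pvJudge]
    | cons ch rest =>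
      by_cases hq : ch = '?'
      · subst hq
        have hsz : 2 * ('?' :: rest).length + 1 ≤ n + 1 := by simpa using hm
        have hA := ih ('a' :: rest) cv cc (by simp at hsz ⊢; omega)
        have hB := ih ('b' :: rest) cv cc (by simp at hsz ⊢; omega)
        rw [pvGoA]
        simp only [hA, hB]
        rw [pvGoodQ, pvBadQ]
        exact pvCombine _ _ _ _ (pvTotal _ _ _) (pvTotal _ _ _)
      · rw [pvGoA]
        have hlen1 : (((cv ++ [ch]).length : Nat) : Int) = (cv.length : Int) + 1 := by simp
        have hlen2 : (((cc ++ [ch]).length : Nat) : Int) = (cc.length : Int) + 1 := by simp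
        by_cases hv : pvIsVowel ch = true
        · simp only [hq, hv, if_false, if_true]
          by_cases h3 : (cv ++ [ch]).length = 3
          · have h3' : (cv.length : Int) + 1 = 3 := by rw [← hlen1, h3]; rfl
            simp [pvAnyGood, pvAnyBad, pvJudge, hq, hv, h3', h3]
          · have h3' : ¬ ((cv.length : Int) + 1 = 3) := by
              rw [← hlen1]; intro hx; apply h3; exact_mod_cast hx
            have hrec := ih rest (cv ++ [ch]) [] (by
              simp at hm ⊢; split_ifs <;> omega)
            simp only [h3, if_false, hrec]
            simp [pvAnyGood, pvAnyBad, hq, hv, h3']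
        · simp only [hq, hv, if_false]
          by_cases h5 : (cc ++ [ch]).length = 5
          · have h5' : (cc.length : Int) + 1 = 5 := by rw [← hlen2, h5]; rfl
            simp [pvAnyGood, pvAnyBad, pvJudge, hq, hv, h5', h5]
          · have h5' : ¬ ((cc.length : Int) + 1 = 5) := by
              rw [← hlen2]; intro hx; apply h5; exact_mod_cast hx
            have hrec := ih rest [] (cc ++ [ch]) (by
              simp at hm ⊢; split_ifs <;> omega)
            simp only [h5, if_false, hrec]
            simp [pvAnyGood, pvAnyBad, hq, hv, h5']

theorem pvGoA_eq (s cv cc : List Char) :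
    pvGoA s cv cc = pvJudge (pvAnyGood s cv.length cc.length) (pvAnyBad s cv.length cc.length) :=
  pvGoA_eq_aux _ s cv cc (le_refl _)

def pvImmBad (asV asC : Bool) (vc : Int × Int) : Bool :=
  (asV && (vc.1 + 1 == 3)) || (asC && (vc.2 + 1 == 5))
def pvSuccs (asV asC : Bool) (vc : Int × Int) : List (Int × Int) :=
  (if asV && !(vc.1 + 1 == 3) then [(vc.1 + 1, 0)] else [])
    ++ (if asC && !(vc.2 + 1 == 5) then [(0, vc.2 + 1)] else [])

theorem pvAltInner_snd (asV asC : Bool) (acc : PySem.Set (Int × Int) × Bool) (vc : Int × Int) :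
    (pvAltInner asV asC acc vc).2 = (acc.2 || pvImmBad asV asC vc) := by
  simp only [pvAltInner, pvImmBad]
  cases asV <;> cases asC <;> split_ifs <;> simp_all

theorem pvAltInner_mem (asV asC : Bool) (acc : PySem.Set (Int × Int) × Bool) (vc : Int × Int)
    (x : Int × Int) :
    x ∈ (pvAltInner asV asC acc vc).1 ↔ x ∈ acc.1 ∨ x ∈ pvSuccs asV asC vc := by
  simp only [pvAltInner, pvSuccs]
  cases asV <;> cases asC <;> split_ifs <;>
    (simp_all [PySem.Set.mem_add]; try tauto)

theorem pvInner_snd (asV asC : Bool) (L : List (Int × Int)) (S0 : PySem.Set (Int × Int)) (b0 : Bool) :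
    (L.foldl (pvAltInner asV asC) (S0, b0)).2 = (b0 || L.any (pvImmBad asV asC)) := by
  induction L generalizing S0 b0 with
  | nil => simp
  | cons vc L ih =>
    simp only [List.foldl_cons, List.any_cons]
    have h := pvAltInner_snd asV asC (S0, b0) vc
    rw [show pvAltInner asV asC (S0, b0) vc
        = ((pvAltInner asV asC (S0, b0) vc).1, (pvAltInner asV asC (S0, b0) vc).2) from rfl, h, ih]
    simp [Bool.or_assoc]

theorem pvInner_mem (asV asC : Bool) (L : List (Int × Int)) (S0 : PySem.Set (Int × Int)) (b0 : Bool)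
    (x : Int × Int) :
    x ∈ (L.foldl (pvAltInner asV asC) (S0, b0)).1 ↔ x ∈ S0 ∨ ∃ vc ∈ L, x ∈ pvSuccs asV asC vc := by
  induction L generalizing S0 b0 with
  | nil => simp
  | cons vc L ih =>
    simp only [List.foldl_cons]
    rw [show pvAltInner asV asC (S0, b0) vc
        = ((pvAltInner asV asC (S0, b0) vc).1, (pvAltInner asV asC (S0, b0) vc).2) from rfl, ih]
    rw [pvAltInner_mem]
    simp only [List.mem_cons]
    constructor
    · rintro ((h | h) | ⟨w, hw, hx⟩)
      · exact Or.inl h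
      · exact Or.inr ⟨vc, Or.inl rfl, h⟩
      · exact Or.inr ⟨w, Or.inr hw, hx⟩
    · rintro (h | ⟨w, (rfl | hw), hx⟩)
      · exact Or.inl (Or.inl h)
      · exact Or.inl (Or.inr hx)
      · exact Or.inr ⟨w, hw, hx⟩

theorem pvGood_succs (ch : Char) (r : List Char) (v c : Int) :
    pvAnyGood (ch :: r) v c
      = (pvSuccs (ch = '?' || pvIsVowel ch) (ch = '?' || !pvIsVowel ch) (v, c)).any
          (fun x => pvAnyGood r x.1 x.2) := by
  simp only [pvAnyGood, pvSuccs]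
  by_cases hq : ch = '?' <;> by_cases hv : pvIsVowel ch = true <;>
    simp [hq, hv] <;> split_ifs <;> simp_all

theorem pvBad_succs (ch : Char) (r : List Char) (v c : Int) :
    pvAnyBad (ch :: r) v c
      = (pvImmBad (ch = '?' || pvIsVowel ch) (ch = '?' || !pvIsVowel ch) (v, c)
          || (pvSuccs (ch = '?' || pvIsVowel ch) (ch = '?' || !pvIsVowel ch) (v, c)).any
              (fun x => pvAnyBad r x.1 x.2)) := by
  simp only [pvAnyBad, pvSuccs, pvImmBad]
  by_cases hq : ch = '?' <;> by_cases hv : pvIsVowel ch = true <;>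
    simp [hq, hv] <;> split_ifs <;> simp_all

theorem pvOuter (s : List Char) (S : PySem.Set (Int × Int)) (b : Bool) :
    ((s.foldl pvAltChar (S, b)).1 = [] ↔ ∀ vc ∈ S, pvAnyGood s vc.1 vc.2 = false)
    ∧ (s.foldl pvAltChar (S, b)).2 = (b || S.any (fun vc => pvAnyBad s vc.1 vc.2)) := by
  induction s generalizing S b with
  | nil =>
    constructor
    · simp [pvAnyGood, List.eq_nil_iff_forall_not_mem]
    · simp [pvAnyBad]
  | cons ch r ih =>
    simp only [List.foldl_cons]
    rw [show pvAltChar (S, b) ch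
        = ((pvAltChar (S, b) ch).1, (pvAltChar (S, b) ch).2) from rfl]
    obtain ⟨ihG, ihB⟩ := ih (pvAltChar (S, b) ch).1 (pvAltChar (S, b) ch).2
    have hmem : ∀ x, x ∈ (pvAltChar (S, b) ch).1 ↔
        ∃ vc ∈ S, x ∈ pvSuccs (ch = '?' || pvIsVowel ch) (ch = '?' || !pvIsVowel ch) vc := by
      intro x
      have := pvInner_mem (ch = '?' || pvIsVowel ch) (ch = '?' || !pvIsVowel ch) S
        PySem.Set.empty b x
      simpa [pvAltChar, PySem.Set.empty] using this
    have hsnd : (pvAltChar (S, b) ch).2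
        = (b || S.any (pvImmBad (ch = '?' || pvIsVowel ch) (ch = '?' || !pvIsVowel ch))) := by
      have := pvInner_snd (ch = '?' || pvIsVowel ch) (ch = '?' || !pvIsVowel ch) S
        PySem.Set.empty b
      simpa [pvAltChar, PySem.Set.empty] using this
    constructor
    · rw [ihG]
      constructor
      · intro h vc hvc
        rw [pvGood_succs]
        rw [List.any_eq_false]
        intro x hx
        exact Bool.not_eq_true _ ▸ h x ((hmem x).mpr ⟨vc, hvc, hx⟩)
      · intro h x hx
        obtain ⟨vc, hvc, hsx⟩ := (hmem x).mp hx
        have := h vc hvc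
        rw [pvGood_succs, List.any_eq_false] at this
        exact Bool.eq_false_iff.mpr (this x hsx)
    · rw [ihB, hsnd]
      rw [Bool.eq_iff_iff]
      simp only [Bool.or_eq_true, List.any_eq_true]
      constructor
      · rintro ((hb | ⟨vc, hvc, him⟩) | ⟨x, hx, hbad⟩)
        · exact Or.inl hb
        · exact Or.inr ⟨vc, hvc, by rw [pvBad_succs]; simp [him]⟩
        · obtain ⟨vc, hvc, hsx⟩ := (hmem x).mp hx
          refine Or.inr ⟨vc, hvc, ?_⟩
          rw [pvBad_succs]
          simp only [Bool.or_eq_true, List.any_eq_true]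
          exact Or.inr ⟨x, hsx, hbad⟩
      · rintro (hb | ⟨vc, hvc, hbad⟩)
        · exact Or.inl (Or.inl hb)
        · rw [pvBad_succs] at hbad
          simp only [Bool.or_eq_true, List.any_eq_true] at hbad
          rcases hbad with him | ⟨x, hsx, hbad⟩
          · exact Or.inl (Or.inr ⟨vc, hvc, him⟩)
          · exact Or.inr ⟨x, (hmem x).mpr ⟨vc, hvc, hsx⟩, hbad⟩

theorem pvAlt_eq (s cv cc : List Char) :
    classifyStringsHelper_alt (String.ofList s) (String.ofList cv) (String.ofList cc)
      = pvJudge (pvAnyGood s cv.length cc.length) (pvAnyBad s cv.length cc.length) := by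
  unfold classifyStringsHelper_alt
  obtain ⟨hG, hB⟩ := pvOuter s
    (PySem.Set.ofList [((cv.length : Int), (cc.length : Int))]) false
  simp only [String.toList_ofList] at *
  rw [show (PySem.Set.ofList [((cv.length : Int), (cc.length : Int))])
      = [((cv.length : Int), (cc.length : Int))] from rfl] at hG hB ⊢
  simp only [List.mem_singleton] at hG hB
  set G := pvAnyGood s (cv.length : Int) (cc.length : Int) with hGdef
  set B := pvAnyBad s (cv.length : Int) (cc.length : Int) with hBdef
  have hG' : (List.foldl pvAltChar ([((cv.length : Int), (cc.length : Int))], false) s).1 = []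
      ↔ G = false := by
    rw [hG]; exact ⟨fun h => h _ rfl, fun h vc hvc => by rw [hvc]; exact h⟩
  have hB' : (List.foldl pvAltChar ([((cv.length : Int), (cc.length : Int))], false) s).2 = B := by
    simpa using hB
  rw [hB']
  cases hGc : G <;> cases hBc : B <;>
    simp_all [pvJudge]

-- ===== VERDICT (by name: the statement is the Claim_ definition above) =====
theorem classifyStringsHelper_spec : Claim_equal_classifyStringsHelper := by
  intro s cv cc _hD
  unfold Spec_classifyStringsHelper
  have h1 := pvGoA_eq s.toList cv.toList cc.toList
  have h2 := pvAlt_eq s.toList cv.toList cc.toList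
  simp only [String.ofList_toList] at h2
  unfold classifyStringsHelper
  rw [h1, ← h2]
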